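-- pv_equiv track=rewrite | github.com/nkartashov/advent_of_code | 2022/6/main.py | detect_unique_chars
-- ===== SOURCE A (Python) =====
-- def detect_unique_chars(line: str, count: int) -> int:
--     chars = dict()
--     for i, x in enumerate(line):
--         if i > count - 1:
--             to_delete = line[i - count]
--             chars[to_delete] -= 1
--             if chars[to_delete] == 0:
--                 del chars[to_delete]
--
--         chars[x] = chars.get(x, 0) + 1
--         if len(chars) == count:
--             return i + 1
--
--     assert (
--         False
--     ), f"Could not find a starting position with {count} unique characters in a row"
-- ===== SOURCE B (Python) =====
-- def detect_unique_chars(line: str, count: int) -> int: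
--     for i in range(count, len(line) + 1):
--         if len(set(line[i - count:i])) == count:
--             return i
--     assert (
--         False
--     ), f"Could not find a starting position with {count} unique characters in a row"
-- ===== Notes on version B (the rewrite author's own statement) =====
-- stated objective: simpler
-- what changed: Replaces the incrementally maintained sliding-window character-count dict (with decrement/delete bookkeeping) by a fresh per-window distinctness check len(set(line[i-count:i])) == count over i in range(count, len(line)+1).
import Mathlib
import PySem

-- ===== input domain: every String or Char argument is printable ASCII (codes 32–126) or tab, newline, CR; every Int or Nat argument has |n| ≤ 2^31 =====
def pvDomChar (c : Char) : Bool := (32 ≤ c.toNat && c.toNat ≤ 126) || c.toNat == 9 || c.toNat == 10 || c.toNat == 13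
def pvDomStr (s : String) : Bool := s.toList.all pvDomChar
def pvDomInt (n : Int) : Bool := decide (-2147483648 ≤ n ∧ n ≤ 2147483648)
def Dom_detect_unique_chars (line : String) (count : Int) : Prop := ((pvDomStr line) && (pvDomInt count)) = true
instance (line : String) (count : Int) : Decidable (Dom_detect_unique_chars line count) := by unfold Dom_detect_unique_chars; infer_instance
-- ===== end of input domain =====

-- B replaces A's incrementally maintained sliding-window count dict by a fresh per-window
-- distinctness check (len(set(window)) == count), for simplicity; equivalence proved on Pre_.

-- ===== PORT A =====
-- A's loop body; `chars[to_delete] -= 1` raises KeyError when the key is absent (reachable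
-- only for count ≤ 0, outside Pre_); it is ported with getD 0, exact whenever the key is
-- present; the fall-through `assert False` (AssertionError) is ported as -1, outside Pre_.
def pvAgo (l : List Char) (count : Int) : List (Int × Char) → PySem.Dict Char Int → Int
  | [], _ => -1
  | (i, x) :: rest, chars =>
    let chars1 :=
      if i > count - 1 then
        let td := (PySem.List.pyGet? l (i - count)).getD ' '
        let c1 := chars.insert td (chars.getD td 0 - 1)
        if c1.getD td 0 = 0 then c1.erase td else c1
      else chars
    let chars2 := chars1.insert x (chars1.getD x 0 + 1)
    if (PySem.Dict.size chars2 : Int) = count then i + 1 else pvAgo l count rest chars2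

def detect_unique_chars (line : String) (count : Int) : Int :=
  pvAgo line.toList count (PySem.List.enumerate line.toList 0) PySem.Dict.empty

-- ===== PORT B =====
-- B's loop over range(count, len(line)+1); the fall-through assert is ported as -1, outside Pre_.
def pvBgo (l : List Char) (count : Int) : List Int → Int
  | [] => -1
  | i :: rest =>
    if PySem.Set.len (PySem.Set.ofList (PySem.List.slice l (some (i - count)) (some i))) = count
    then i else pvBgo l count rest

def detect_unique_chars_alt (line : String) (count : Int) : Int :=
  pvBgo line.toList count (PySem.List.pyRange count ((line.toList.length : Int) + 1) 1)

-- ===== PRECONDITION & SPEC =====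
-- Pre_ excludes exactly the inputs on which A raises: count < 1 (KeyError / IndexError /
-- AssertionError) and lines containing no window of count pairwise-distinct consecutive
-- characters (the final AssertionError).
def Pre_detect_unique_chars (line : String) (count : Int) : Prop :=
  1 ≤ count ∧ ∃ j ∈ List.range (line.toList.length + 1),
    count ≤ (j : Int) ∧ ((line.toList.drop (j - count.toNat)).take count.toNat).Nodup
instance (line : String) (count : Int) : Decidable (Pre_detect_unique_chars line count) := by
  unfold Pre_detect_unique_chars; infer_instance

def pvWitness_detect_unique_chars : String × Int := ("abc", 2)

def Spec_detect_unique_chars (line : String) (count : Int) (out : Int) : Prop := out = detect_unique_chars_alt line count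
instance (line : String) (count : Int) (out : Int) : Decidable (Spec_detect_unique_chars line count out) := by unfold Spec_detect_unique_chars; infer_instance

-- ===== CLAIM (what is proved, stated in full; the proofs are below) =====
def Claim_equal_detect_unique_chars : Prop := ∀ (line : String) (count : Int), Dom_detect_unique_chars line count → Pre_detect_unique_chars line count → Spec_detect_unique_chars line count (detect_unique_chars line count)
-- ===== LEMMAS AND PROOFS =====

-- The window of the last (at most) n characters among the first k characters of l.
def pvWin (l : List Char) (n k : Nat) : List Char := (l.take k).drop (k - n)

-- A's dict represents the multiset of characters of the list w.
def pvInv (chars : PySem.Dict Char Int) (w : List Char) : Prop :=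
  chars.keys.Nodup ∧ (∀ c, chars.getD c 0 = (w.count c : Int)) ∧
    (∀ c, chars.contains c = true ↔ c ∈ w)

-- The common specification: first index j in the given list with an all-distinct window.
def pvFirst (l : List Char) (n : Nat) : List Nat → Int
  | [] => -1
  | j :: rest =>
    if n ≤ j ∧ ((l.take j).drop (j - n)).Nodup then (j : Int) else pvFirst l n rest

theorem pvInv_empty : pvInv PySem.Dict.empty [] := by
  refine ⟨by simp [PySem.Dict.keys, PySem.Dict.empty], ?_, ?_⟩ <;> intro c <;>
    simp [PySem.Dict.getD_empty, PySem.Dict.contains_empty]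

-- erase helpers (PySem.Dict.erase is items.filter on the key)
theorem pvFind_filter (xs : List (Char × Int)) (k c : Char) (h : c ≠ k) :
    (xs.filter (fun p => !(p.1 == k))).find? (fun p => p.1 == c) =
      xs.find? (fun p => p.1 == c) := by
  induction xs with
  | nil => rfl
  | cons p xs ih =>
    by_cases h1 : p.1 = k
    · have h2 : ¬ p.1 = c := by rw [h1]; exact fun e => h e.symm
      rw [List.filter_cons_of_neg (by simp [h1]), List.find?_cons_of_neg (by simp [h2]), ih]
    · by_cases h2 : p.1 = c
      · rw [List.filter_cons_of_pos (by simp [h1]), List.find?_cons_of_pos (by simp [h2]),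
          List.find?_cons_of_pos (by simp [h2])]
      · rw [List.filter_cons_of_pos (by simp [h1]), List.find?_cons_of_neg (by simp [h2]),
          List.find?_cons_of_neg (by simp [h2]), ih]

theorem pvErase_getD_ne (d : PySem.Dict Char Int) (k c : Char) (h : c ≠ k) :
    (d.erase k).getD c 0 = d.getD c 0 := by
  simp only [PySem.Dict.getD, PySem.Dict.get?, PySem.Dict.erase]
  rw [pvFind_filter d.items k c h]

theorem pvErase_contains (d : PySem.Dict Char Int) (k c : Char) :
    (d.erase k).contains c = true ↔ (c ≠ k ∧ d.contains c = true) := by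
  simp only [PySem.Dict.contains, PySem.Dict.erase, List.any_eq_true, List.mem_filter]
  constructor
  · rintro ⟨p, ⟨hp, hpk⟩, hpc⟩
    have hpc' : p.1 = c := by simpa using hpc
    have hpk' : ¬ p.1 = k := by simpa using hpk
    exact ⟨by rw [← hpc']; exact hpk', ⟨p, hp, hpc⟩⟩
  · rintro ⟨hck, p, hp, hpc⟩
    have hpc' : p.1 = c := by simpa using hpc
    exact ⟨p, ⟨hp, by simp [hpc', hck]⟩, hpc⟩

theorem pvErase_nodup_keys (d : PySem.Dict Char Int) (k : Char) (h : d.keys.Nodup) :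
    (d.erase k).keys.Nodup := by
  have hsub : (d.erase k).keys.Sublist d.keys :=
    List.Sublist.map _ List.filter_sublist
  exact h.sublist hsub

theorem pvInv_size {chars : PySem.Dict Char Int} {w : List Char} (h : pvInv chars w) :
    PySem.Dict.size chars = w.dedup.length := by
  obtain ⟨hnd, -, hmem⟩ := h
  have hperm : chars.keys.Perm w.dedup := by
    rw [List.perm_ext_iff_of_nodup hnd (List.nodup_dedup w)]
    intro c
    rw [← PySem.Dict.contains_iff_mem_keys, List.mem_dedup]
    exact hmem c
  have hsz : PySem.Dict.size chars = chars.keys.length := by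
    simp [PySem.Dict.size, PySem.Dict.keys]
  rw [hsz, hperm.length_eq]

theorem pvInv_add {chars : PySem.Dict Char Int} {w : List Char} (h : pvInv chars w) (x : Char) :
    pvInv (chars.insert x (chars.getD x 0 + 1)) (w ++ [x]) := by
  obtain ⟨hnd, hcnt, hmem⟩ := h
  refine ⟨PySem.Dict.nodup_keys_insert _ _ _ hnd, ?_, ?_⟩
  · intro c
    rw [PySem.Dict.getD_insert]
    by_cases hcx : c = x
    · subst hcx
      rw [if_pos rfl, hcnt c]
      simp [List.count_append]
    · rw [if_neg hcx, hcnt c]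
      simp [List.count_append, Ne.symm hcx]
  · intro c
    rw [PySem.Dict.contains_insert]
    simp only [Bool.or_eq_true, beq_iff_eq, hmem c, List.mem_append, List.mem_singleton]
    tauto

theorem pvInv_remove {chars : PySem.Dict Char Int} {td : Char} {w : List Char}
    (h : pvInv chars (td :: w)) :
    pvInv (if (chars.insert td (chars.getD td 0 - 1)).getD td 0 = 0
           then (chars.insert td (chars.getD td 0 - 1)).erase td
           else chars.insert td (chars.getD td 0 - 1)) w := by
  obtain ⟨hnd, hcnt, hmem⟩ := h
  have hc1 : ∀ c, (chars.insert td (chars.getD td 0 - 1)).getD c 0 =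
      if c = td then (w.count td : Int) else ((td :: w).count c : Int) := by
    intro c
    rw [PySem.Dict.getD_insert]
    by_cases hctd : c = td
    · subst hctd
      rw [if_pos rfl, if_pos rfl, hcnt c]
      simp
    · rw [if_neg hctd, if_neg hctd, hcnt c]
  have hc1nd : (chars.insert td (chars.getD td 0 - 1)).keys.Nodup :=
    PySem.Dict.nodup_keys_insert _ _ _ hnd
  have hc1mem : ∀ c, (chars.insert td (chars.getD td 0 - 1)).contains c = true ↔ c ∈ td :: w := by
    intro c
    rw [PySem.Dict.contains_insert]
    simp only [Bool.or_eq_true, beq_iff_eq, hmem c, List.mem_cons]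
    tauto
  by_cases hz : (chars.insert td (chars.getD td 0 - 1)).getD td 0 = 0
  · rw [if_pos hz]
    have htdw : td ∉ w := by
      rw [hc1, if_pos rfl] at hz
      have : w.count td = 0 := by exact_mod_cast hz
      exact List.count_eq_zero.mp this
    refine ⟨pvErase_nodup_keys _ _ hc1nd, ?_, ?_⟩
    · intro c
      by_cases hctd : c = td
      · subst hctd
        have hnc : (( chars.insert c (chars.getD c 0 - 1)).erase c).contains c = false := by
          rw [← Bool.not_eq_true]
          intro hcon
          exact absurd ((pvErase_contains _ _ _).mp hcon).1 (by simp)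
        rw [PySem.Dict.getD_of_not_contains _ _ hnc]
        have : w.count c = 0 := List.count_eq_zero.mpr htdw
        simp [this]
      · rw [pvErase_getD_ne _ _ _ hctd, hc1, if_neg hctd]
        simp [Ne.symm hctd]
    · intro c
      rw [pvErase_contains, hc1mem]
      simp only [List.mem_cons]
      constructor
      · rintro ⟨hck, hc | hc⟩
        · exact absurd hc hck
        · exact hc
      · intro hc
        exact ⟨fun e => htdw (e ▸ hc), Or.inr hc⟩
  · rw [if_neg hz]
    have htdw : td ∈ w := by
      rw [hc1, if_pos rfl] at hz
      have : w.count td ≠ 0 := by exact_mod_cast hz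
      exact List.count_pos_iff.mp (Nat.pos_of_ne_zero this)
    refine ⟨hc1nd, ?_, ?_⟩
    · intro c
      rw [hc1]
      by_cases hctd : c = td
      · subst hctd; rw [if_pos rfl]
      · rw [if_neg hctd]
        simp [Ne.symm hctd]
    · intro c
      rw [hc1mem]
      simp only [List.mem_cons]
      constructor
      · rintro (hc | hc)
        · exact hc ▸ htdw
        · exact hc
      · exact Or.inr

theorem pvDedupLen {w : List Char} {n : Nat} (hlen : w.length = n) :
    w.dedup.length = n ↔ w.Nodup := by
  constructor
  · intro h
    exact List.dedup_eq_self.mp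
      (List.Sublist.eq_of_length (List.dedup_sublist w) (h.trans hlen.symm))
  · intro h
    rw [List.dedup_eq_self.mpr h, hlen]

theorem pvSetLen (w : List Char) : (PySem.Set.ofList w).length = w.dedup.length := by
  have hperm : (PySem.Set.ofList w).Perm w.dedup := by
    rw [List.perm_ext_iff_of_nodup (PySem.Set.nodup_ofList w) (List.nodup_dedup w)]
    intro c
    rw [PySem.Set.mem_ofList, List.mem_dedup]
  exact hperm.length_eq

-- the size test of A is exactly the distinctness test of the spec
theorem pvSize_test {l : List Char} {n k : Nat} (hn : 1 ≤ n) (hk : k < l.length)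
    {chars : PySem.Dict Char Int} (h : pvInv chars (pvWin l n (k + 1))) :
    ((PySem.Dict.size chars : Int) = (n : Int)) ↔
      (n ≤ k + 1 ∧ ((l.take (k+1)).drop (k + 1 - n)).Nodup) := by
  have hsize := pvInv_size h
  have hwlen : (pvWin l n (k+1)).length = min (k+1) n := by
    show ((l.take (k+1)).drop (k+1-n)).length = _
    rw [List.length_drop, List.length_take]
    omega
  have hle : (pvWin l n (k+1)).dedup.length ≤ (pvWin l n (k+1)).length :=
    (List.dedup_sublist _).length_le
  constructor
  · intro he
    have he' : PySem.Dict.size chars = n := by exact_mod_cast he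
    rw [hsize] at he'
    have h1 : n ≤ k + 1 := by omega
    have hwn : (pvWin l n (k+1)).length = n := by omega
    exact ⟨h1, (pvDedupLen hwn).mp he'⟩
  · rintro ⟨h1, h2⟩
    have hwn : (pvWin l n (k+1)).length = n := by omega
    have : (pvWin l n (k+1)).dedup.length = n := (pvDedupLen hwn).mpr h2
    rw [hsize]
    exact_mod_cast this

theorem pvA_loop (l : List Char) (n : Nat) (hn : 1 ≤ n) :
    ∀ k chars, k ≤ l.length → pvInv chars (pvWin l n k) →
      pvAgo l (n : Int) (PySem.List.enumerate (l.drop k) (k : Int)) chars =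
        pvFirst l n (List.range' (k + 1) (l.length - k)) := by
  have H : ∀ m k chars, l.length - k = m → k ≤ l.length → pvInv chars (pvWin l n k) →
      pvAgo l (n : Int) (PySem.List.enumerate (l.drop k) (k : Int)) chars =
        pvFirst l n (List.range' (k + 1) (l.length - k)) := by
    intro m
    induction m with
    | zero =>
      intro k chars hm hk hinv
      have hk' : k = l.length := by omega
      subst hk'
      rw [List.drop_length, hm]
      simp [pvAgo, PySem.List.enumerate_nil, pvFirst]
    | succ m ih =>
      intro k chars hm hk hinv
      have hklt : k < l.length := by omega
      rw [List.drop_eq_getElem_cons hklt, PySem.List.enumerate_cons]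
      have htake1 : l.take (k + 1) = l.take k ++ [l[k]] := by
        rw [List.take_add_one, List.getElem?_eq_getElem hklt]
        rfl
      -- the updated dict satisfies the invariant for the (k+1)-window
      by_cases hcase : n ≤ k
      · -- removal branch: i > count - 1
        have htd : (PySem.List.pyGet? l ((k : Int) - (n : Int))).getD ' ' = l[k - n] := by
          rw [show ((k : Int) - (n : Int)) = ((k - n : Nat) : Int) by omega,
            PySem.List.pyGet?_natCast, List.getElem?_eq_getElem (by omega)]
          rfl
        have hwk : pvWin l n k = l[k - n] :: (l.take k).drop (k - n + 1) := by
          show (l.take k).drop (k - n) = _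
          rw [List.drop_eq_getElem_cons (by rw [List.length_take]; omega)]
          congr 1
          exact List.getElem_take
        have hwk1 : pvWin l n (k + 1) = (l.take k).drop (k - n + 1) ++ [l[k]] := by
          show (l.take (k + 1)).drop (k + 1 - n) = _
          rw [htake1, show k + 1 - n = k - n + 1 by omega,
            List.drop_append_of_le_length (by rw [List.length_take]; omega)]
        rw [hwk] at hinv
        have h3 := pvInv_add (pvInv_remove hinv) (l[k])
        rw [← hwk1] at h3
        simp only [pvAgo]
        rw [htd, if_pos (show (k : Int) > (n : Int) - 1 by omega), hm, List.range'_succ]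
        simp only [pvFirst]
        by_cases hgood : n ≤ k + 1 ∧ ((l.take (k + 1)).drop (k + 1 - n)).Nodup
        · rw [if_pos ((pvSize_test hn hklt h3).mpr hgood), if_pos hgood]
          omega
        · rw [if_neg (fun hc => hgood ((pvSize_test hn hklt h3).mp hc)), if_neg hgood]
          have := ih (k + 1) _ (by omega) (by omega) h3
          rw [show l.length - (k + 1) = m by omega] at this
          rw [show ((k : Int) + 1) = ((k + 1 : Nat) : Int) by omega]
          exact this
      · -- no removal: i ≤ count - 1
        have hwk : pvWin l n k = l.take k := by
          show (l.take k).drop (k - n) = _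
          rw [show k - n = 0 by omega, List.drop_zero]
        have hwk1 : pvWin l n (k + 1) = l.take k ++ [l[k]] := by
          show (l.take (k + 1)).drop (k + 1 - n) = _
          rw [htake1, show k + 1 - n = 0 by omega, List.drop_zero]
        rw [hwk] at hinv
        have h3 := pvInv_add hinv (l[k])
        rw [← hwk1] at h3
        simp only [pvAgo]
        rw [if_neg (show ¬ ((k : Int) > (n : Int) - 1) by omega), hm, List.range'_succ]
        simp only [pvFirst]
        by_cases hgood : n ≤ k + 1 ∧ ((l.take (k + 1)).drop (k + 1 - n)).Nodup
        · rw [if_pos ((pvSize_test hn hklt h3).mpr hgood), if_pos hgood]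
          omega
        · rw [if_neg (fun hc => hgood ((pvSize_test hn hklt h3).mp hc)), if_neg hgood]
          have := ih (k + 1) _ (by omega) (by omega) h3
          rw [show l.length - (k + 1) = m by omega] at this
          rw [show ((k : Int) + 1) = ((k + 1 : Nat) : Int) by omega]
          exact this
  intro k chars hk hinv
  exact H (l.length - k) k chars rfl hk hinv

theorem pvB_loop (l : List Char) (n : Nat) (hn : 1 ≤ n) :
    ∀ j : Nat, n ≤ j →
      pvBgo l (n : Int) (PySem.List.pyRange (j : Int) ((l.length : Int) + 1) 1) =
        pvFirst l n (List.range' j (l.length + 1 - j)) := by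
  have H : ∀ m j, n ≤ j → l.length + 1 - j = m →
      pvBgo l (n : Int) (PySem.List.pyRange (j : Int) ((l.length : Int) + 1) 1) =
        pvFirst l n (List.range' j (l.length + 1 - j)) := by
    intro m
    induction m with
    | zero =>
      intro j hj hm
      rw [PySem.List.pyRange_one_eq_nil (by omega), hm]
      simp [pvBgo, pvFirst]
    | succ m ih =>
      intro j hj hm
      have hjlen : j ≤ l.length := by omega
      rw [PySem.List.pyRange_one_cons (by omega)]
      simp only [pvBgo]
      rw [show ((j : Int) - (n : Int)) = ((j - n : Nat) : Int) by omega,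
        PySem.List.slice_natCast]
      have hw : (l.take j).drop (j - n) = (l.drop (j - n)).take (j - (j - n)) :=
        List.drop_take
      have hwlen : ((l.drop (j - n)).take (j - (j - n))).length = n := by
        rw [List.length_take, List.length_drop]
        omega
      have hcond : (PySem.Set.len (PySem.Set.ofList ((l.drop (j - n)).take (j - (j - n)))) =
          (n : Int)) ↔ (n ≤ j ∧ ((l.take j).drop (j - n)).Nodup) := by
        rw [hw]
        unfold PySem.Set.len
        rw [show ((PySem.Set.ofList ((l.drop (j - n)).take (j - (j - n)))).length : Int) =
            (n : Int) ↔ (PySem.Set.ofList ((l.drop (j - n)).take (j - (j - n)))).length = n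
          from ⟨fun h => by exact_mod_cast h, fun h => by exact_mod_cast h⟩]
        rw [pvSetLen, pvDedupLen hwlen]
        exact (and_iff_right hj).symm
      rw [hm, List.range'_succ]
      simp only [pvFirst]
      by_cases hgood : n ≤ j ∧ ((l.take j).drop (j - n)).Nodup
      · rw [if_pos (hcond.mpr hgood), if_pos hgood]
      · rw [if_neg (fun hc => hgood (hcond.mp hc)), if_neg hgood]
        have := ih (j + 1) (by omega) (by omega)
        rw [show l.length + 1 - (j + 1) = m by omega] at this
        rw [show ((j : Int) + 1) = ((j + 1 : Nat) : Int) by omega]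
        exact this
  intro j hj
  exact H (l.length + 1 - j) j hj rfl

theorem pvFirst_skip (l : List Char) (n : Nat) (_hn : 1 ≤ n) :
    ∀ j : Nat, 1 ≤ j → j ≤ n →
      pvFirst l n (List.range' j (l.length + 1 - j)) =
        pvFirst l n (List.range' n (l.length + 1 - n)) := by
  have H : ∀ m j, 1 ≤ j → j ≤ n → n - j = m →
      pvFirst l n (List.range' j (l.length + 1 - j)) =
        pvFirst l n (List.range' n (l.length + 1 - n)) := by
    intro m
    induction m with
    | zero =>
      intro j _ hjn hm
      rw [show j = n by omega]
    | succ m ih =>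
      intro j hj1 hjn hm
      by_cases hjl : j ≤ l.length
      · rw [show l.length + 1 - j = (l.length - j) + 1 by omega, List.range'_succ]
        simp only [pvFirst]
        rw [if_neg (by rintro ⟨h1, -⟩; omega)]
        rw [show l.length - j = l.length + 1 - (j + 1) by omega]
        exact ih (j + 1) (by omega) (by omega) (by omega)
      · rw [show l.length + 1 - j = 0 by omega, show l.length + 1 - n = 0 by omega]
        simp [pvFirst]
  intro j hj1 hjn
  exact H (n - j) j hj1 hjn rfl

-- ===== VERDICT (by name: the statement is the Claim_ definition above) =====
theorem detect_unique_chars_spec : Claim_equal_detect_unique_chars := by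
  intro line count _ hpre
  obtain ⟨hc, -⟩ := hpre
  unfold Spec_detect_unique_chars detect_unique_chars detect_unique_chars_alt
  set l := line.toList with hl
  obtain ⟨n, rfl⟩ : ∃ n : Nat, count = (n : Int) := ⟨count.toNat, (Int.toNat_of_nonneg (by omega)).symm⟩
  have hn : 1 ≤ n := by exact_mod_cast hc
  have hA := pvA_loop l n hn 0 PySem.Dict.empty (Nat.zero_le _) (by simpa [pvWin] using pvInv_empty)
  have hB := pvB_loop l n hn n le_rfl
  simp only [List.drop_zero, Nat.cast_zero, Nat.sub_zero, Nat.zero_add] at hA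
  rw [hA, hB]
  simpa using pvFirst_skip l n hn 1 le_rfl hn
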